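-- pv_equiv track=rewrite | github.com/yasser-ensembl3/Audio-transcriber | podcast_transcript.py | transcript_to_markdown
-- ===== SOURCE A (Python) =====
-- def transcript_to_markdown(transcript_text, url, title):
--     """Convert transcript to markdown"""
--     lines = []
--
--     lines.append(f"# {title}\n")
--     lines.append(f"**Source:** {url}\n")
--     lines.append("---\n")
--
--     # Format into paragraphs (every ~5 sentences)
--     sentences = transcript_text.replace('\n', ' ').split('. ')
--     paragraph = []
--     for i, sentence in enumerate(sentences):
--         paragraph.append(sentence.strip())
--         if (i + 1) % 5 == 0:
--             lines.append('. '.join(paragraph) + '.\n')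
--             paragraph = []
--
--     if paragraph:
--         lines.append('. '.join(paragraph))
--
--     return '\n'.join(lines)
-- ===== SOURCE B (Python) =====
-- def transcript_to_markdown(transcript_text, url, title):
--     """Convert transcript to markdown"""
--     sentences = [s.strip() for s in transcript_text.replace('\n', ' ').split('. ')]
--     chunks = [sentences[j:j + 5] for j in range(0, len(sentences), 5)]
--     lines = [f"# {title}\n", f"**Source:** {url}\n", "---\n"]
--     body = ['. '.join(c) + '.\n' if len(c) == 5 else '. '.join(c) for c in chunks]
--     return '\n'.join(lines + body)
-- ===== Notes on version B (the rewrite author's own statement) =====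
-- stated objective: simpler
-- what changed: B replaces A's stateful loop (enumerate counter + mutable paragraph buffer flushed every 5th sentence, plus a trailing flush) by stripping all sentences up front, slicing the list into chunks of 5 with a range-step comprehension, and mapping each chunk to its line (full chunks get '.\n', the short last chunk does not).
import Mathlib
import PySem

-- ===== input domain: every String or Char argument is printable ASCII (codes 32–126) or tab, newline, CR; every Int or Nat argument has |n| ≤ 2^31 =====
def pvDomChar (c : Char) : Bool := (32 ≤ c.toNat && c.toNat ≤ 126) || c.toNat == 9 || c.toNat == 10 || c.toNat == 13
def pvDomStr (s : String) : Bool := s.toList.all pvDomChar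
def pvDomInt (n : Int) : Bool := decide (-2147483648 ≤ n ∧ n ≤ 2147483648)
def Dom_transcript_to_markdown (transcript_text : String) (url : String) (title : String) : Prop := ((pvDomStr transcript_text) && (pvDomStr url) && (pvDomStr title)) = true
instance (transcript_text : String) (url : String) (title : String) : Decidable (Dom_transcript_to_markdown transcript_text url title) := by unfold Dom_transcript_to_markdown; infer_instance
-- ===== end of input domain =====

-- B formats the same markdown by pre-stripping the sentences and slicing them into chunks of 5,
-- instead of A's counter-driven paragraph buffer; objective: simpler. Both ports work on List Char.

-- ===== PORT A =====
-- loop body of A's 'for i, sentence in enumerate(sentences)': state = (lines, paragraph)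
def tmdStep (acc : List (List Char) × List (List Char)) (p : Int × List Char) : List (List Char) × List (List Char) :=
  let paragraph := acc.2 ++ [PySem.Chars.strip p.2]
  if PySem.Int.mod (p.1 + 1) 5 = 0 then
    (acc.1 ++ [PySem.Chars.join ". ".toList paragraph ++ ".\n".toList], [])
  else
    (acc.1, paragraph)

def transcript_to_markdown (transcript_text : String) (url : String) (title : String) : String :=
  let lines : List (List Char) :=
    ["# ".toList ++ title.toList ++ "\n".toList,
     "**Source:** ".toList ++ url.toList ++ "\n".toList,
     "---\n".toList]
  let sentences := PySem.Chars.splitOn (PySem.Chars.replace transcript_text.toList "\n".toList " ".toList) ". ".toList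
  let st := (PySem.List.enumerate sentences).foldl tmdStep (lines, [])
  let lines' := if st.2 = [] then st.1 else st.1 ++ [PySem.Chars.join ". ".toList st.2]
  String.ofList (PySem.Chars.join "\n".toList lines')

-- ===== PORT B =====
-- line for one chunk: '. '.join(c) + '.\n' if len(c) == 5 else '. '.join(c)
def tmdChunkLine (c : List (List Char)) : List Char :=
  if c.length = 5 then PySem.Chars.join ". ".toList c ++ ".\n".toList
  else PySem.Chars.join ". ".toList c

def transcript_to_markdown_alt (transcript_text : String) (url : String) (title : String) : String :=
  let sentences := (PySem.Chars.splitOn (PySem.Chars.replace transcript_text.toList "\n".toList " ".toList) ". ".toList).map PySem.Chars.strip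
  let chunks := (PySem.List.pyRange 0 (sentences.length : Int) 5).map
      (fun j => PySem.List.slice sentences (some j) (some (j + 5)))
  let lines : List (List Char) :=
    ["# ".toList ++ title.toList ++ "\n".toList,
     "**Source:** ".toList ++ url.toList ++ "\n".toList,
     "---\n".toList]
  let body := chunks.map tmdChunkLine
  String.ofList (PySem.Chars.join "\n".toList (lines ++ body))

-- ===== PRECONDITION & SPEC =====
def Spec_transcript_to_markdown (transcript_text : String) (url : String) (title : String) (out : String) : Prop := out = transcript_to_markdown_alt transcript_text url title
instance (transcript_text : String) (url : String) (title : String) (out : String) : Decidable (Spec_transcript_to_markdown transcript_text url title out) := by unfold Spec_transcript_to_markdown; infer_instance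

-- ===== CLAIM (what is proved, stated in full; the proofs are below) =====
def Claim_equal_transcript_to_markdown : Prop := ∀ (transcript_text : String) (url : String) (title : String), Dom_transcript_to_markdown transcript_text url title → Spec_transcript_to_markdown transcript_text url title (transcript_to_markdown transcript_text url title)

-- ===== LEMMAS AND PROOFS =====

-- chunks-of-5 of a list, the common reference shape both sides are reduced to
def chunksOf5 (l : List (List Char)) : List (List (List Char)) :=
  if l = [] then [] else l.take 5 :: chunksOf5 (l.drop 5)
termination_by l.length
decreasing_by
  simp only [List.length_drop]
  cases l with
  | nil => simp_all
  | cons a t => simp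

theorem chunksOf5_nil : chunksOf5 [] = [] := by
  rw [chunksOf5]; simp

theorem chunksOf5_cons (l : List (List Char)) (h : l ≠ []) :
    chunksOf5 l = l.take 5 :: chunksOf5 (l.drop 5) := by
  rw [chunksOf5]; simp [h]

theorem step_ne (acc : List (List Char) × List (List Char)) (p : Int × List Char)
    (h : (p.1 + 1) % 5 ≠ 0) : tmdStep acc p = (acc.1, acc.2 ++ [PySem.Chars.strip p.2]) := by
  simp [tmdStep, h]

theorem step_eq (acc : List (List Char) × List (List Char)) (p : Int × List Char)
    (h : (p.1 + 1) % 5 = 0) :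
    tmdStep acc p =
      (acc.1 ++ [PySem.Chars.join ". ".toList (acc.2 ++ [PySem.Chars.strip p.2]) ++ ".\n".toList], []) := by
  simp [tmdStep, h]

-- no flush happens while (i+1) % 5 ≠ 0, so the loop just accumulates stripped sentences
theorem acc_nil (ss : List (List Char)) : ∀ (s : Int) (L P : List (List Char)),
    (∀ k : Nat, k < ss.length → (s + k + 1) % 5 ≠ 0) →
    (PySem.List.enumerate ss s).foldl tmdStep (L, P) = (L, P ++ ss.map PySem.Chars.strip) := by
  induction ss with
  | nil => intro s L P _; simp [PySem.List.enumerate]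
  | cons a t ih =>
    intro s L P h
    rw [PySem.List.enumerate_cons, List.foldl_cons,
        step_ne (L, P) (s, a) (by have := h 0 (by simp); simpa using this)]
    rw [ih (s + 1) L (P ++ [PySem.Chars.strip a]) (fun k hk => by
      have := h (k + 1) (by simpa using Nat.succ_lt_succ hk)
      push_cast at this ⊢; omega)]
    simp

-- the workhorse: A's loop (started at index 5*m) followed by the trailing flush
-- produces exactly the chunk lines of the stripped sentence list
theorem loop_eq : ∀ (n : Nat) (ss : List (List Char)) (m : Nat) (L : List (List Char)),
    ss.length ≤ n →
    (if ((PySem.List.enumerate ss (5 * (m : Int))).foldl tmdStep (L, [])).2 = []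
     then ((PySem.List.enumerate ss (5 * (m : Int))).foldl tmdStep (L, [])).1
     else ((PySem.List.enumerate ss (5 * (m : Int))).foldl tmdStep (L, [])).1
          ++ [PySem.Chars.join ". ".toList
                (((PySem.List.enumerate ss (5 * (m : Int))).foldl tmdStep (L, [])).2)])
    = L ++ (chunksOf5 (ss.map PySem.Chars.strip)).map tmdChunkLine := by
  intro n
  induction n with
  | zero =>
    intro ss m L h
    have : ss = [] := List.eq_nil_of_length_eq_zero (Nat.le_zero.mp h)
    subst this
    simp [PySem.List.enumerate, chunksOf5_nil]
  | succ n ih =>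
    intro ss m L h
    by_cases h5 : 5 ≤ ss.length
    · -- at least one full chunk: peel five explicit steps
      obtain ⟨a, ss1⟩ : ∃ a t, ss = a :: t := by
        cases ss with | nil => simp at h5 | cons a t => exact ⟨a, t, rfl⟩
      obtain ⟨t, rfl⟩ := ss1
      obtain ⟨b, t, rfl⟩ : ∃ b t', t = b :: t' := by
        cases t with | nil => simp at h5 | cons b t' => exact ⟨b, t', rfl⟩
      obtain ⟨c, t, rfl⟩ : ∃ c t', t = c :: t' := by
        cases t with | nil => simp at h5 | cons c t' => exact ⟨c, t', rfl⟩
      obtain ⟨d, t, rfl⟩ : ∃ d t', t = d :: t' := by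
        cases t with | nil => simp at h5 | cons d t' => exact ⟨d, t', rfl⟩
      obtain ⟨e, rest, rfl⟩ : ∃ e t', t = e :: t' := by
        cases t with | nil => simp at h5 | cons e t' => exact ⟨e, t', rfl⟩
      rw [PySem.List.enumerate_cons, List.foldl_cons,
          step_ne (L, []) (5 * (m : Int), a) (by omega)]
      rw [PySem.List.enumerate_cons, List.foldl_cons,
          step_ne (L, [] ++ [PySem.Chars.strip a]) (5 * (m : Int) + 1, b) (by omega)]
      rw [PySem.List.enumerate_cons, List.foldl_cons,
          step_ne (L, [] ++ [PySem.Chars.strip a] ++ [PySem.Chars.strip b])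
            (5 * (m : Int) + 1 + 1, c) (by omega)]
      rw [PySem.List.enumerate_cons, List.foldl_cons,
          step_ne (L, [] ++ [PySem.Chars.strip a] ++ [PySem.Chars.strip b] ++ [PySem.Chars.strip c])
            (5 * (m : Int) + 1 + 1 + 1, d) (by omega)]
      rw [PySem.List.enumerate_cons, List.foldl_cons,
          step_eq (L, [] ++ [PySem.Chars.strip a] ++ [PySem.Chars.strip b] ++ [PySem.Chars.strip c]
                       ++ [PySem.Chars.strip d])
            (5 * (m : Int) + 1 + 1 + 1 + 1, e) (by omega)]
      rw [show (5 * (m : Int) + 1 + 1 + 1 + 1 + 1) = 5 * ((m + 1 : Nat) : Int) by push_cast; ring]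
      have hrest : rest.length ≤ n := by simp at h; omega
      rw [ih rest (m + 1)
        (L ++ [PySem.Chars.join ". ".toList
          ([] ++ [PySem.Chars.strip a] ++ [PySem.Chars.strip b] ++ [PySem.Chars.strip c]
             ++ [PySem.Chars.strip d] ++ [PySem.Chars.strip e]) ++ ".\n".toList]) hrest]
      have hC : chunksOf5 ((a :: b :: c :: d :: e :: rest).map PySem.Chars.strip)
          = [PySem.Chars.strip a, PySem.Chars.strip b, PySem.Chars.strip c, PySem.Chars.strip d,
             PySem.Chars.strip e] :: chunksOf5 (rest.map PySem.Chars.strip) := by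
        rw [chunksOf5_cons _ (by simp)]; simp
      rw [hC]
      simp [tmdChunkLine]
    · -- fewer than five sentences: no flush, one (possibly empty) trailing paragraph
      cases hss : ss with
      | nil => subst hss; simp [PySem.List.enumerate, chunksOf5_nil]
      | cons a t =>
        rw [← hss]
        rw [acc_nil ss (5 * (m : Int)) L [] (fun k hk => by omega)]
        have hne : ss.map PySem.Chars.strip ≠ [] := by subst hss; simp
        have hlt : ss.length < 5 := by omega
        rw [chunksOf5_cons _ hne]
        have htake : (ss.map PySem.Chars.strip).take 5 = ss.map PySem.Chars.strip :=
          List.take_of_length_le (by simp; omega)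
        have hdrop : (ss.map PySem.Chars.strip).drop 5 = [] :=
          List.drop_eq_nil_of_le (by simp; omega)
        rw [htake, hdrop, chunksOf5_nil]
        simp only [List.map_cons, List.map_nil, List.nil_append]
        rw [if_neg hne]
        simp [tmdChunkLine]
        omega

-- B's range-step slices are exactly take-5-of-drop
theorem slice5 (ss : List (List Char)) (k : Nat) :
    PySem.List.slice ss (some (0 + 5 * (k : Int))) (some (0 + 5 * (k : Int) + 5))
      = (ss.drop (5 * k)).take 5 := by
  have h := PySem.List.slice_natCast_add ss (5 * k) 5
  have e : ((5 : Nat) : Int) = (5 : Int) := by norm_num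
  rw [e] at h
  have e1 : (0 + 5 * (k : Int)) = ((5 * k : Nat) : Int) := by push_cast; ring
  rw [e1]
  exact h

theorem rangeChunks : ∀ (n : Nat) (ss : List (List Char)), ss.length ≤ n →
    (List.range ((ss.length + 4) / 5)).map (fun k => (ss.drop (5 * k)).take 5) = chunksOf5 ss := by
  intro n
  induction n with
  | zero =>
    intro ss h
    have : ss = [] := List.eq_nil_of_length_eq_zero (Nat.le_zero.mp h)
    subst this; simp [chunksOf5_nil]
  | succ n ih =>
    intro ss h
    cases hss : ss with
    | nil => simp [chunksOf5_nil]
    | cons a t =>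
      rw [← hss]
      have hpos : 1 ≤ ss.length := by subst hss; simp
      have hq : (ss.length + 4) / 5 = ((ss.length - 5) + 4) / 5 + 1 := by omega
      rw [hq, List.range_succ_eq_map]
      rw [chunksOf5_cons _ (by subst hss; simp)]
      have hlen5 : (ss.drop 5).length = ss.length - 5 := by simp
      have hih := ih (ss.drop 5) (by simp; omega)
      rw [hlen5] at hih
      simp only [List.map_cons, List.map_map, Nat.mul_zero, List.drop_zero]
      congr 1
      rw [← hih]
      apply List.map_congr_left
      intro k _
      simp only [Function.comp_apply]
      rw [List.drop_drop]
      congr 2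
      omega

-- B's pyRange/slice chunking is chunksOf5
theorem chunks_eq (ss : List (List Char)) :
    (PySem.List.pyRange 0 (ss.length : Int) 5).map
        (fun j => PySem.List.slice ss (some j) (some (j + 5)))
      = chunksOf5 ss := by
  rw [PySem.List.pyRange_of_pos 0 (ss.length : Int) (by norm_num)]
  by_cases h0 : ss = []
  · subst h0; simp [chunksOf5_nil]
  · have hpos : 1 ≤ ss.length := by
      cases ss with | nil => simp at h0 | cons a t => simp
    have hif : ((0 : Int) < (ss.length : Int)) := by exact_mod_cast hpos
    rw [if_pos hif]
    have hdiv : (((ss.length : Int) - 0 + 5 - 1) / 5).toNat = (ss.length + 4) / 5 := by omega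
    rw [hdiv, List.map_map]
    rw [← rangeChunks ss.length ss (le_refl _)]
    apply List.map_congr_left
    intro k _
    simp only [Function.comp]
    exact slice5 ss k

-- ===== VERDICT (by name: the statement is the Claim_ definition above) =====
theorem transcript_to_markdown_spec : Claim_equal_transcript_to_markdown := by
  intro transcript_text url title _
  unfold Spec_transcript_to_markdown
  unfold transcript_to_markdown transcript_to_markdown_alt
  dsimp only
  set ss := PySem.Chars.splitOn
    (PySem.Chars.replace transcript_text.toList "\n".toList " ".toList) ". ".toList with hss
  set L : List (List Char) :=
    ["# ".toList ++ title.toList ++ "\n".toList,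
     "**Source:** ".toList ++ url.toList ++ "\n".toList,
     "---\n".toList] with hL
  have hA := loop_eq ss.length ss 0 L (le_refl _)
  rw [show (5 * ((0 : Nat) : Int)) = 0 by norm_num] at hA
  have hB := congrArg (List.map tmdChunkLine) (chunks_eq (ss.map PySem.Chars.strip))
  congr 1
  congr 1
  rw [hB]
  exact hA
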